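-- pv_equiv track=rewrite | github.com/TessFerrandez/AdventOfCode-Python | 2021/day4-1.py | calculate_best_board
-- ===== SOURCE A (Python) =====
-- from typing import Dict, List, Tuple
--
-- def calculate_best_board(boards, numbers, call_order) -> Tuple[int, int]:
--     wins_at = len(numbers)
--     winning_board = -1
--
--     for board_i, board in enumerate(boards):
--         min_board_call = len(numbers)
--
--         # rows
--         for row in board:
--             max_row_call = max(call_order[number] for number in row)
--             min_board_call = min(min_board_call, max_row_call)
--
--         # columns
--         for column in zip(*board):
--             max_column_call = max(call_order[number] for number in column)
--             min_board_call = min(min_board_call, max_column_call)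
--
--         if min_board_call < wins_at:
--             wins_at = min_board_call
--             winning_board = board_i
--
--     return wins_at, winning_board
-- ===== SOURCE B (Python) =====
-- def calculate_best_board(boards, numbers, call_order):
--     # One pass per board: running per-column maxima via zip, no transpose.
--     wins_at = len(numbers)
--     winning_board = -1
--     for board_i, board in enumerate(boards):
--         t = len(numbers)
--         col_max = None
--         for row in board:
--             calls = [call_order[n] for n in row]
--             t = min(t, max(calls))
--             col_max = calls if col_max is None else [max(a, b) for a, b in zip(col_max, calls)]
--         if col_max is not None and col_max:
--             t = min(t, min(col_max))
--         if t < wins_at: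
--             wins_at, winning_board = t, board_i
--     return wins_at, winning_board
-- ===== Notes on version B (the rewrite author's own statement) =====
-- stated objective: alternative
-- what changed: B replaces A's transpose-then-scan of columns (zip(*board) plus a second line loop) by a single pass over each board's rows that keeps a running per-column maximum vector (elementwise max via zip), taking the column minimum once at the end.
import Mathlib
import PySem

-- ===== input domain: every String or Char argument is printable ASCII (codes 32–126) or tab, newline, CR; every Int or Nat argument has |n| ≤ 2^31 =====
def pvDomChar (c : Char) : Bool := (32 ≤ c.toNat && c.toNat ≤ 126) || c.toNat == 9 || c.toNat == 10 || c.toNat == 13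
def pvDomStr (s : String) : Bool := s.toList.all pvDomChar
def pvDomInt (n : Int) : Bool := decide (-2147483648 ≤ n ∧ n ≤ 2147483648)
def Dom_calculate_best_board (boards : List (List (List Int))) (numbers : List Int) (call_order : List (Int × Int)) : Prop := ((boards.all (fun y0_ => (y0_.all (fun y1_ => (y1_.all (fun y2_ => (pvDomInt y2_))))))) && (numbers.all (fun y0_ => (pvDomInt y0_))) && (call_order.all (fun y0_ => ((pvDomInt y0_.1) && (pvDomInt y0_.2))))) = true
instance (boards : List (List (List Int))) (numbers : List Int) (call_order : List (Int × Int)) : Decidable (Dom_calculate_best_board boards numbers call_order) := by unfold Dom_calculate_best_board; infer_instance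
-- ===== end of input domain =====

-- B replaces A's transpose + second column loop by a single pass per board keeping a
-- running per-column maximum vector (alternative decomposition, same cost).


-- shared primitive: call_order[n] (dict lookup, first match; 0 default is unreachable inside Pre_)
def pvLookup (co : List (Int × Int)) (n : Int) : Int :=
  ((PySem.Dict.mk co).get? n).getD 0

-- ===== PORT A =====
-- zip(*board): Python's transpose truncated to the shortest row (exact hand port)
def pvZipT (rows : List (List Int)) : List (List Int) :=
  match rows with
  | [] => []
  | [r] => r.map (fun x => [x])
  | r :: rs => List.zipWith List.cons r (pvZipT rs)

-- max(call_order[number] for number in line); .getD 0 is unreachable inside Pre_ (nonempty lines)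
def pvLineMax (co : List (Int × Int)) (line : List Int) : Int :=
  (PySem.List.max? (line.map (pvLookup co)) (fun y => y)).getD 0

def calculate_best_board (boards : List (List (List Int))) (numbers : List Int) (call_order : List (Int × Int)) : Int × Int :=
  (PySem.List.enumerate boards 0).foldl
    (fun (st : Int × Int) (p : Int × List (List Int)) =>
      let mbc1 : Int := p.2.foldl (fun acc row => min acc (pvLineMax call_order row)) (numbers.length : Int)
      let mbc : Int := (pvZipT p.2).foldl (fun acc col => min acc (pvLineMax call_order col)) mbc1
      if mbc < st.1 then (mbc, p.1) else st)
    ((numbers.length : Int), -1)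

-- ===== PORT B =====
def calculate_best_board_alt (boards : List (List (List Int))) (numbers : List Int) (call_order : List (Int × Int)) : Int × Int :=
  (PySem.List.enumerate boards 0).foldl
    (fun (best : Int × Int) (p : Int × List (List Int)) =>
      let tc : Int × Option (List Int) := p.2.foldl
        (fun (s : Int × Option (List Int)) row =>
          let calls := row.map (pvLookup call_order)
          (min s.1 ((PySem.List.max? calls (fun y => y)).getD 0),
           some (match s.2 with
                 | none => calls
                 | some c => List.zipWith max c calls)))
        ((numbers.length : Int), none)
      let t : Int := match tc.2 with
        | none => tc.1
        | some c => if c = [] then tc.1 else min tc.1 ((PySem.List.min? c (fun y => y)).getD 0)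
      if t < best.1 then (t, p.1) else best)
    ((numbers.length : Int), -1)

-- ===== PRECONDITION & SPEC =====
-- Pre_ excludes exactly the inputs on which Python A raises: an empty line (ValueError from
-- max over an empty generator) or a board cell absent from call_order (KeyError).
def Pre_calculate_best_board (boards : List (List (List Int))) (numbers : List Int) (call_order : List (Int × Int)) : Prop :=
  boards.all (fun b => b.all (fun row =>
    !row.isEmpty && row.all (fun n => call_order.any (fun p => p.1 == n)))) = true
instance (boards : List (List (List Int))) (numbers : List Int) (call_order : List (Int × Int)) : Decidable (Pre_calculate_best_board boards numbers call_order) := by unfold Pre_calculate_best_board; infer_instance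

def pvWitness_calculate_best_board : List (List (List Int)) × List Int × (List (Int × Int)) :=
  ([[[1, 2], [3, 4]], [[4, 1], [2, 3]]], [3, 1, 4, 2], [(3, 0), (1, 1), (4, 2), (2, 3)])

def Spec_calculate_best_board (boards : List (List (List Int))) (numbers : List Int) (call_order : List (Int × Int)) (out : Int × Int) : Prop := out = calculate_best_board_alt boards numbers call_order
instance (boards : List (List (List Int))) (numbers : List Int) (call_order : List (Int × Int)) (out : Int × Int) : Decidable (Spec_calculate_best_board boards numbers call_order out) := by unfold Spec_calculate_best_board; infer_instance

-- ===== CLAIM (what is proved, stated in full; the proofs are below) =====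
def Claim_equal_calculate_best_board : Prop := ∀ (boards : List (List (List Int))) (numbers : List Int) (call_order : List (Int × Int)), Dom_calculate_best_board boards numbers call_order → Pre_calculate_best_board boards numbers call_order → Spec_calculate_best_board boards numbers call_order (calculate_best_board boards numbers call_order)

-- ===== LEMMAS AND PROOFS =====

-- foldl max pulls a max out front (max is associative and commutative)
theorem pv_foldl_max_pull (l : List Int) : ∀ (a c : Int), List.foldl max (max a c) l = max a (List.foldl max c l) := by
  induction l with
  | nil => intro a c; rfl
  | cons x t ih =>
    intro a c
    simp only [List.foldl_cons]
    rw [show max (max a c) x = max a (max c x) from max_assoc a c x, ih]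

theorem pv_foldl_min_pull (l : List Int) : ∀ (a c : Int), List.foldl min (min a c) l = min a (List.foldl min c l) := by
  induction l with
  | nil => intro a c; rfl
  | cons x t ih =>
    intro a c
    simp only [List.foldl_cons]
    rw [show min (min a c) x = min a (min c x) from min_assoc a c x, ih]

-- max of a nonempty list, as PySem computes it
theorem pv_max_cons (x : Int) (t : List Int) :
    (PySem.List.max? (x :: t) (fun y => y)).getD 0 = t.foldl max x := by
  rw [PySem.List.max?_id_cons]; rfl

theorem pv_min_cons (x : Int) (t : List Int) :
    (PySem.List.min? (x :: t) (fun y => y)).getD 0 = t.foldl min x := by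
  rw [PySem.List.min?_id_cons]; rfl

-- members of zipWith cons are nonempty
theorem pv_zipWith_cons_ne : ∀ (r : List Int) (T : List (List Int)) (col : List Int),
    col ∈ List.zipWith List.cons r T → col ≠ [] := by
  intro r
  induction r with
  | nil => intro T col h; simp at h
  | cons x r ih =>
    intro T col h
    cases T with
    | nil => simp at h
    | cons c T =>
      simp only [List.zipWith_cons_cons, List.mem_cons] at h
      rcases h with rfl | h
      · simp
      · exact ih T col h

-- every column produced by pvZipT of a nonempty row list is nonempty
theorem pvZipT_cols_ne (rows : List (List Int)) :
    ∀ col ∈ pvZipT rows, col ≠ [] := by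
  induction rows with
  | nil => intro col h; simp [pvZipT] at h
  | cons r rs ih =>
    intro col h
    match rs, h with
    | [], h =>
      simp only [pvZipT, List.mem_map] at h
      obtain ⟨x, -, rfl⟩ := h; simp
    | r' :: rs', h =>
      simp only [pvZipT] at h
      exact pv_zipWith_cons_ne r (pvZipT (r' :: rs')) col h

-- max of a nonempty (cons) line, with the head pulled out
theorem pvLineMax_cons (co : List (Int × Int)) (x : Int) (col : List Int) (h : col ≠ []) :
    pvLineMax co (x :: col) = max (pvLookup co x) (pvLineMax co col) := by
  obtain ⟨c0, ct, rfl⟩ := List.exists_cons_of_ne_nil h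
  simp only [pvLineMax, List.map_cons, pv_max_cons, List.foldl_cons]
  rw [pv_foldl_max_pull]

-- mapping the line-max over zipWith cons, columns nonempty
theorem pv_map_cons_cols (co : List (Int × Int)) : ∀ (r : List Int) (cols : List (List Int)),
    (∀ col ∈ cols, col ≠ []) →
    (List.zipWith List.cons r cols).map (fun col => pvLineMax co col)
      = List.zipWith max (r.map (pvLookup co)) (cols.map (fun col => pvLineMax co col)) := by
  intro r
  induction r with
  | nil => intro cols _; simp
  | cons x r ih =>
    intro cols hne
    cases cols with
    | nil => simp
    | cons c cs =>
      simp only [List.zipWith_cons_cons, List.map_cons]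
      rw [pvLineMax_cons co x c (hne c (by simp)), ih cs (fun col hc => hne col (by simp [hc]))]

-- zipWith max is associative
theorem pv_zipWith_max_assoc : ∀ (a b c : List Int),
    List.zipWith max (List.zipWith max a b) c = List.zipWith max a (List.zipWith max b c) := by
  intro a
  induction a with
  | nil => intro b c; simp
  | cons x a ih =>
    intro b c
    cases b with
    | nil => simp
    | cons y b =>
      cases c with
      | nil => simp
      | cons z c =>
        simp only [List.zipWith_cons_cons]
        rw [max_assoc, ih]

-- foldl of zipWith max pulls the first operand out front
theorem pv_foldl_zmax_pull (L : List (List Int)) : ∀ (a b : List Int),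
    L.foldl (fun c r => List.zipWith max c r) (List.zipWith max a b)
      = List.zipWith max a (L.foldl (fun c r => List.zipWith max c r) b) := by
  induction L with
  | nil => intro a b; rfl
  | cons x t ih =>
    intro a b
    simp only [List.foldl_cons]
    rw [pv_zipWith_max_assoc, ih]

-- THE transpose lemma: per-column maxima of zip(*rows) equal the elementwise-max fold of the mapped rows
theorem pvZipT_map_max (co : List (Int × Int)) :
    ∀ (rs : List (List Int)) (r : List Int),
    (pvZipT (r :: rs)).map (fun col => pvLineMax co col)
      = (rs.map (fun row => row.map (pvLookup co))).foldl
          (fun c calls => List.zipWith max c calls) (r.map (pvLookup co)) := by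
  intro rs
  induction rs with
  | nil =>
    intro r
    simp only [pvZipT, List.map_nil, List.foldl_nil, List.map_map]
    apply List.map_congr_left
    intro x _
    simp [pvLineMax, pv_max_cons]
  | cons r' rs' ih =>
    intro r
    show (List.zipWith List.cons r (pvZipT (r' :: rs'))).map (fun col => pvLineMax co col) = _
    rw [pv_map_cons_cols co r (pvZipT (r' :: rs')) (pvZipT_cols_ne (r' :: rs')), ih r',
        ← pv_foldl_zmax_pull]
    simp [List.foldl_cons]

-- B's paired fold, unfolded into its two independent components
theorem pv_pairfold (co : List (Int × Int)) (rows : List (List Int)) : ∀ (t : Int) (c : List Int),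
    rows.foldl
      (fun (s : Int × Option (List Int)) row =>
        let calls := row.map (pvLookup co)
        (min s.1 ((PySem.List.max? calls (fun y => y)).getD 0),
         some (match s.2 with
               | none => calls
               | some c => List.zipWith max c calls)))
      (t, some c)
    = (rows.foldl (fun acc row => min acc (pvLineMax co row)) t,
       some ((rows.map (fun row => row.map (pvLookup co))).foldl
         (fun c calls => List.zipWith max c calls) c)) := by
  induction rows with
  | nil => intro t c; rfl
  | cons r rs ih =>
    intro t c
    simp only [List.foldl_cons, List.map_cons]
    rw [ih]
    rfl

-- A's fold over column maxima equals a plain min-fold over the mapped list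
theorem pv_foldl_min_map (co : List (Int × Int)) (cols : List (List Int)) (t : Int) :
    cols.foldl (fun acc col => min acc (pvLineMax co col)) t
      = (cols.map (fun col => pvLineMax co col)).foldl min t := by
  rw [List.foldl_map]

-- per-board equality of the candidate value
theorem pv_board_eq (co : List (Int × Int)) (n : Int) (board : List (List Int)) :
    (pvZipT board).foldl (fun acc col => min acc (pvLineMax co col))
      (board.foldl (fun acc row => min acc (pvLineMax co row)) n)
    = (let tc : Int × Option (List Int) := board.foldl
        (fun (s : Int × Option (List Int)) row =>
          let calls := row.map (pvLookup co)
          (min s.1 ((PySem.List.max? calls (fun y => y)).getD 0),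
           some (match s.2 with
                 | none => calls
                 | some c => List.zipWith max c calls)))
        (n, none)
       match tc.2 with
       | none => tc.1
       | some c => if c = [] then tc.1 else min tc.1 ((PySem.List.min? c (fun y => y)).getD 0)) := by
  cases board with
  | nil => rfl
  | cons r rs =>
    show _ = (let tc := rs.foldl _ (min n ((PySem.List.max? (r.map (pvLookup co)) (fun y => y)).getD 0),
        some (r.map (pvLookup co)));
      match tc.2 with
      | none => tc.1
      | some c => if c = [] then tc.1 else min tc.1 ((PySem.List.min? c (fun y => y)).getD 0))
    rw [pv_pairfold co rs (min n ((PySem.List.max? (r.map (pvLookup co)) (fun y => y)).getD 0))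
        (r.map (pvLookup co))]
    have hL : (r :: rs).foldl (fun acc row => min acc (pvLineMax co row)) n
        = rs.foldl (fun acc row => min acc (pvLineMax co row))
            (min n ((PySem.List.max? (r.map (pvLookup co)) (fun y => y)).getD 0)) := rfl
    rw [hL, pv_foldl_min_map co (pvZipT (r :: rs)), pvZipT_map_max co rs r]
    set t1 := rs.foldl (fun acc row => min acc (pvLineMax co row))
      (min n ((PySem.List.max? (r.map (pvLookup co)) (fun y => y)).getD 0)) with ht1
    set cm := (rs.map (fun row => row.map (pvLookup co))).foldl
      (fun c calls => List.zipWith max c calls) (r.map (pvLookup co)) with hcm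
    show cm.foldl min t1 = _
    cases hcme : cm with
    | nil => simp
    | cons c0 ct =>
      simp only [List.foldl_cons, pv_min_cons]
      have hne : ¬ (c0 :: ct = ([] : List Int)) := by simp
      rw [if_neg hne, pv_foldl_min_pull]

-- ===== VERDICT (by name: the statement is the Claim_ definition above) =====
theorem calculate_best_board_spec : Claim_equal_calculate_best_board := by
  intro boards numbers call_order _ _
  unfold Spec_calculate_best_board calculate_best_board calculate_best_board_alt
  have hf : (fun (st : Int × Int) (p : Int × List (List Int)) =>
      let mbc1 : Int := p.2.foldl (fun acc row => min acc (pvLineMax call_order row)) (numbers.length : Int)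
      let mbc : Int := (pvZipT p.2).foldl (fun acc col => min acc (pvLineMax call_order col)) mbc1
      if mbc < st.1 then (mbc, p.1) else st)
    = (fun (best : Int × Int) (p : Int × List (List Int)) =>
      let tc : Int × Option (List Int) := p.2.foldl
        (fun (s : Int × Option (List Int)) row =>
          let calls := row.map (pvLookup call_order)
          (min s.1 ((PySem.List.max? calls (fun y => y)).getD 0),
           some (match s.2 with
                 | none => calls
                 | some c => List.zipWith max c calls)))
        ((numbers.length : Int), none)
      let t : Int := match tc.2 with
        | none => tc.1
        | some c => if c = [] then tc.1 else min tc.1 ((PySem.List.min? c (fun y => y)).getD 0)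
      if t < best.1 then (t, p.1) else best) := by
    funext st p
    simp only []
    rw [← pv_board_eq call_order (numbers.length : Int) p.2]
  rw [hf]
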